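-- pv_equiv track=rewrite | github.com/Leapense/problems | 20167번: 꿈틀꿈틀 호석 애벌레 - 기능성/solution.py | compute_max_energy
-- ===== SOURCE A (Python) =====
-- def compute_max_energy(n: int, k: int, values: list[int]) -> int:
--     prefix: list[int] = [0] * (n + 1)
--     for i in range(n):
--         prefix[i + 1] = prefix[i] + values[i]
--
--     next_idx: list[int] = [-1] * n
--     surplus: list[int] = [0] * n
--     for i in range(n):
--         for j in range(i, n):
--             if prefix[j + 1] - prefix[i] >= k:
--                 next_idx[i] = j
--                 surplus[i] = prefix[j + 1] - prefix[i] - k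
--                 break
--
--     dp: list[int] = [0] * (n + 1)
--     for i in range(n - 1, -1, -1):
--         best = dp[i + 1]
--         if next_idx[i] != -1:
--             best = max(best, surplus[i] + dp[next_idx[i] + 1])
--         dp[i] = best
--     return dp[0]
-- ===== SOURCE B (Python) =====
-- def compute_max_energy(n: int, k: int, values: list[int]) -> int:
--     # Forward event sweep (longest path in the jump DAG, relaxed by end
--     # position): every position opens a candidate window carrying the best
--     # energy reachable at its start; a candidate closes at the first moment
--     # its running sum reaches k, relaxing the best value at the next
--     # position with its surplus.  No prefix array and no backward pass.
--     best = 0                 # best energy achievable using a prefix of the values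
--     open_cands = []          # (running sum, best-at-start) of still-open windows
--     for v in values[:n]:
--         open_cands.append((0, best))
--         incoming = best
--         still_open = []
--         for s, b in open_cands:
--             s += v
--             if s >= k:
--                 incoming = max(incoming, b + s - k)
--             else:
--                 still_open.append((s, b))
--         open_cands = still_open
--         best = incoming
--     return best
-- ===== Notes on version B (the rewrite author's own statement) =====
-- stated objective: alternative
-- what changed: A's four staged passes (prefix-sum array, next_idx/surplus arrays via per-start forward scans, then a backward dp array) are replaced by a single forward event sweep: each position opens a candidate window carrying the best energy at its start, and a window closing (first time its running sum reaches k) relaxes the running best at the next position - longest path in the jump DAG computed forward instead of backward.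
-- outside the precondition, e.g. on compute_max_energy(-1, 3, [1, 2]): A raises IndexError, B returns 0; on compute_max_energy(3, 2, [5]): A raises IndexError, B returns 3
import Mathlib
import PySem

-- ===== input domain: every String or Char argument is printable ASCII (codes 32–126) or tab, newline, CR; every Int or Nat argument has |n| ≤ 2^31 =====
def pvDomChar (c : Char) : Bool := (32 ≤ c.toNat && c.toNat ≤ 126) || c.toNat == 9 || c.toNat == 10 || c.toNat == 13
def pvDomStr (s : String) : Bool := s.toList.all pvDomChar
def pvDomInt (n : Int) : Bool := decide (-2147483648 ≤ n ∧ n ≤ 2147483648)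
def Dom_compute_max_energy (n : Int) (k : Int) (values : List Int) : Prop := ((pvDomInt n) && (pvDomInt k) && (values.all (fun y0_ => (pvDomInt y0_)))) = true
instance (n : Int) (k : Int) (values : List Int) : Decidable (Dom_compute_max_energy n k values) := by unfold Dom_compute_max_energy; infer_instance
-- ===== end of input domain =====

-- One honest line: B replaces A's staged passes (prefix sums, next_idx, surplus, backward dp)
-- by a single forward sweep maintaining the still-open candidate windows (objective: alternative).

-- ===== PORT A =====
-- A's inner loop 'for j in range(i, n): … break', returning the (j, surplus) it breaks on (none = no break)
def aFind (pfx : List Int) (k : Int) (i : Int) : List Int → Option (Int × Int)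
  | [] => none
  | j :: js =>
    if PySem.List.pyGetD pfx (j + 1) 0 - PySem.List.pyGetD pfx i 0 ≥ k then
      some (j, PySem.List.pyGetD pfx (j + 1) 0 - PySem.List.pyGetD pfx i 0 - k)
    else aFind pfx k i js

def aPrefix (n : Int) (values : List Int) : List Int :=
  (PySem.List.pyRange 0 n 1).foldl
    (fun p i => PySem.List.pySetD p (i + 1) (PySem.List.pyGetD p i 0 + PySem.List.pyGetD values i 0))
    (List.replicate (n + 1).toNat (0 : Int))

def aNextSur (n : Int) (k : Int) (pfx : List Int) : List Int × List Int :=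
  (PySem.List.pyRange 0 n 1).foldl
    (fun st i =>
      match aFind pfx k i (PySem.List.pyRange i n 1) with
      | none => st
      | some (j, su) => (PySem.List.pySetD st.1 i j, PySem.List.pySetD st.2 i su))
    (List.replicate n.toNat (-1 : Int), List.replicate n.toNat (0 : Int))

def aDp (n : Int) (ns : List Int × List Int) : List Int :=
  (PySem.List.pyRange (n - 1) (-1) (-1)).foldl
    (fun dp i =>
      let best := PySem.List.pyGetD dp (i + 1) 0
      let best := if PySem.List.pyGetD ns.1 i 0 ≠ -1 then
          max best (PySem.List.pyGetD ns.2 i 0 + PySem.List.pyGetD dp (PySem.List.pyGetD ns.1 i 0 + 1) 0)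
        else best
      PySem.List.pySetD dp i best)
    (List.replicate (n + 1).toNat (0 : Int))

def compute_max_energy (n : Int) (k : Int) (values : List Int) : Int :=
  let pfx := aPrefix n values
  let ns := aNextSur n k pfx
  let dp := aDp n ns
  PySem.List.pyGetD dp 0 0

-- ===== PORT B =====
-- B's loop body: open a candidate for this position, then run the inner loop over the
-- open candidates (state = (incoming, still_open)), and take (best, open_cands) from it
def bStep (k : Int) (st : Int × List (Int × Int)) (v : Int) : Int × List (Int × Int) :=
  let cands := st.2 ++ [(0, st.1)]
  let r := cands.foldl
    (fun (acc : Int × List (Int × Int)) (c : Int × Int) =>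
      let s := c.1 + v
      if s ≥ k then (max acc.1 (c.2 + s - k), acc.2)
      else (acc.1, acc.2 ++ [(s, c.2)]))
    (st.1, ([] : List (Int × Int)))
  (r.1, r.2)

def compute_max_energy_alt (n : Int) (k : Int) (values : List Int) : Int :=
  ((PySem.List.slice values none (some n)).foldl (bStep k) (0, [])).1

-- ===== PRECONDITION & SPEC =====
-- Pre_ excludes exactly the inputs where A raises IndexError: n < 0 (dp[0] on an empty dp)
-- and n > len(values) (values[i] out of range).
def Pre_compute_max_energy (n : Int) (k : Int) (values : List Int) : Prop :=
  0 ≤ n ∧ n ≤ (values.length : Int)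
instance (n : Int) (k : Int) (values : List Int) : Decidable (Pre_compute_max_energy n k values) := by
  unfold Pre_compute_max_energy; infer_instance

def pvWitness_compute_max_energy : Int × Int × List Int := (3, 5, [2, 4, 1])

def Spec_compute_max_energy (n : Int) (k : Int) (values : List Int) (out : Int) : Prop := out = compute_max_energy_alt n k values
instance (n : Int) (k : Int) (values : List Int) (out : Int) : Decidable (Spec_compute_max_energy n k values out) := by unfold Spec_compute_max_energy; infer_instance

-- ===== CLAIM (what is proved, stated in full; the proofs are below) =====
def Claim_equal_compute_max_energy : Prop := ∀ (n : Int) (k : Int) (values : List Int), Dom_compute_max_energy n k values → Pre_compute_max_energy n k values → Spec_compute_max_energy n k values (compute_max_energy n k values)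

-- ===== LEMMAS AND PROOFS =====

-- ---- proof-side helper: the backward dp list A effectively computes (dp[i] = pvF of the suffix) ----
def bScan (k : Int) : Int → Int → List Int → List Int → Int
  | s, best, v :: vs, d :: ds =>
    if s + v ≥ k then (if s + v - k + d > best then s + v - k + d else best)
    else bScan k (s + v) best vs ds
  | _, best, _, _ => best

def bOuter (k : Int) : List Int → List Int
  | [] => [0]
  | v :: vs =>
    let dp := bOuter k vs
    bScan k 0 (dp.headD 0) (v :: vs) dp :: dp

def pvF (k : Int) (l : List Int) : Int := (bOuter k l).headD 0

theorem pvF_nil (k : Int) : pvF k [] = 0 := rfl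

theorem pvF_cons (k : Int) (v : Int) (vs : List Int) :
    pvF k (v :: vs) = bScan k 0 (pvF k vs) (v :: vs) (bOuter k vs) := rfl

theorem bOuter_cons (k v : Int) (vs : List Int) :
    bOuter k (v :: vs) = pvF k (v :: vs) :: bOuter k vs := rfl

theorem bScan_nil_ws (k s best : Int) (ds : List Int) : bScan k s best [] ds = best := by
  cases ds <;> rfl

theorem bScan_cons (k s best v d : Int) (vs ds : List Int) :
    bScan k s best (v :: vs) (d :: ds) =
      if s + v ≥ k then (if s + v - k + d > best then s + v - k + d else best)
      else bScan k (s + v) best vs ds := rfl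

theorem pvMax_eq_ite (b c : Int) : max b c = if c > b then c else b := by
  rcases le_total b c with h | h <;> rw [max_def] <;> split_ifs <;> omega

theorem mapRange_set (N : Nat) (f : Nat → Int) (j : Nat) (v : Int) (_h : j < N) :
    ((List.range N).map f).set j v = (List.range N).map (fun t => if t = j then v else f t) := by
  apply List.ext_getElem
  · simp
  · intro t h1 h2
    simp only [List.length_set, List.length_map, List.length_range] at h1
    rw [List.getElem_set]
    simp only [List.getElem_map, List.getElem_range]
    split_ifs with h3 h4 h4 <;> first | rfl | omega

theorem mapRange_getD (N : Nat) (f : Nat → Int) (t : Nat) (h : t < N) :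
    ((List.range N).map f).getD t 0 = f t := by
  have hlt : t < ((List.range N).map f).length := by simpa using h
  rw [List.getD_eq_getElem _ _ hlt]
  simp

theorem replicate_eq_mapRange (N : Nat) (v : Int) :
    List.replicate N v = (List.range N).map (fun _ => v) := by
  apply List.ext_getElem <;> simp

theorem aFind_mem (pfx : List Int) (k i : Int) (js : List Int) (j su : Int)
    (h : aFind pfx k i js = some (j, su)) : j ∈ js := by
  induction js with
  | nil => simp [aFind] at h
  | cons a as ih =>
    rw [aFind] at h
    split_ifs at h with hc
    · simp only [Option.some.injEq, Prod.mk.injEq] at h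
      simp [h.1]
    · exact List.mem_cons_of_mem _ (ih h)

-- the prefix-sum array A builds: entry t (t ≤ c) is sum(values[:t])
theorem pfx_fold (values : List Int) (m : Nat) (hm : m ≤ values.length) :
    ∀ c : Nat, c ≤ m →
      (PySem.List.pyRange 0 (c : Int) 1).foldl
        (fun p i => PySem.List.pySetD p (i + 1) (PySem.List.pyGetD p i 0 + PySem.List.pyGetD values i 0))
        (List.replicate (m + 1) (0 : Int))
      = (List.range (m + 1)).map (fun t => if t ≤ c then ((values.take t).sum) else 0) := by
  intro c
  induction c with
  | zero =>
    intro _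
    rw [PySem.List.pyRange_one_eq_nil (by norm_num)]
    simp only [List.foldl_nil]
    rw [replicate_eq_mapRange]
    refine List.map_congr_left ?_
    intro t _
    rcases Nat.eq_zero_or_pos t with h | h
    · subst h; simp
    · rw [if_neg (by omega)]
  | succ c ih =>
    intro hc
    have hcast : ((c + 1 : Nat) : Int) = (c : Int) + 1 := by push_cast; ring
    rw [hcast, PySem.List.pyRange_one_succ_right (by positivity), List.foldl_append,
        ih (by omega)]
    simp only [List.foldl_cons, List.foldl_nil]
    have h1 : PySem.List.pyGetD ((List.range (m + 1)).map
        (fun t => if t ≤ c then ((values.take t).sum) else 0)) (c : Int) 0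
        = (values.take c).sum := by
      rw [PySem.List.pyGetD_natCast, mapRange_getD _ _ _ (by omega), if_pos (by omega)]
    have h2 : PySem.List.pyGetD values (c : Int) 0 = values[c]'(by omega) := by
      rw [PySem.List.pyGetD_natCast, List.getD_eq_getElem]
    rw [h1, h2]
    have hcast2 : ((c : Int) + 1) = ((c + 1 : Nat) : Int) := by push_cast; ring
    rw [hcast2, PySem.List.pySetD_natCast, mapRange_set _ _ _ _ (by omega)]
    refine List.map_congr_left ?_
    intro t ht
    simp only [List.mem_range] at ht
    by_cases h3 : t = c + 1
    · subst h3
      rw [if_pos rfl, if_pos (by omega), List.sum_take_succ _ _ (by omega)]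
    · rw [if_neg h3]
      by_cases h4 : t ≤ c
      · rw [if_pos h4, if_pos (by omega)]
      · rw [if_neg h4, if_neg (by omega)]

-- B's inner scan agrees with A's inner scan (aFind over prefix differences)
theorem bscan_aFind (values : List Int) (k : Int) (m : Nat) (hm : m ≤ values.length)
    (pfx : List Int)
    (hP : ∀ t : Nat, t ≤ m → PySem.List.pyGetD pfx (t : Int) 0 = (values.take t).sum)
    (i : Nat) :
    ∀ fuel a : Nat, i ≤ a → a ≤ m → m - a = fuel → ∀ best : Int,
      bScan k ((values.take a).sum - (values.take i).sum) best
        ((values.take m).drop a) (bOuter k ((values.take m).drop (a + 1)))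
      = match aFind pfx k (i : Int) (PySem.List.pyRange (a : Int) (m : Int) 1) with
        | none => best
        | some (j, su) =>
          if su + pvF k ((values.take m).drop (j.toNat + 1)) > best then
            su + pvF k ((values.take m).drop (j.toNat + 1)) else best := by
  intro fuel
  induction fuel with
  | zero =>
    intro a hia ham hfuel best
    have ha : a = m := by omega
    subst ha
    rw [List.drop_of_length_le (by rw [List.length_take]; omega), bScan_nil_ws,
        PySem.List.pyRange_one_eq_nil (by omega)]
    rfl
  | succ fuel ihf =>
    intro a hia ham hfuel best
    have ham' : a < m := by omega
    have hlen : a < (values.take m).length := by rw [List.length_take]; omega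
    have hdrop : (values.take m).drop a = (values.take m)[a] :: (values.take m).drop (a + 1) :=
      List.drop_eq_getElem_cons hlen
    have hval : (values.take m)[a]'hlen = values[a]'(by omega) := List.getElem_take
    have hsum : (values.take a).sum - (values.take i).sum + values[a]'(by omega)
        = (values.take (a + 1)).sum - (values.take i).sum := by
      rw [List.sum_take_succ _ _ (by omega)]; ring
    have hcond : (PySem.List.pyGetD pfx ((a : Int) + 1) 0 - PySem.List.pyGetD pfx (i : Int) 0)
        = (values.take (a + 1)).sum - (values.take i).sum := by
      have h1 : ((a : Int) + 1) = ((a + 1 : Nat) : Int) := by push_cast; ring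
      rw [h1, hP (a + 1) (by omega), hP i (by omega)]
    have hrange : PySem.List.pyRange (a : Int) (m : Int) 1
        = (a : Int) :: PySem.List.pyRange ((a : Int) + 1) (m : Int) 1 :=
      PySem.List.pyRange_one_cons (by exact_mod_cast ham')
    have hstep : aFind pfx k (i : Int) (PySem.List.pyRange (a : Int) (m : Int) 1)
        = if (values.take (a + 1)).sum - (values.take i).sum ≥ k
          then some ((a : Int), (values.take (a + 1)).sum - (values.take i).sum - k)
          else aFind pfx k (i : Int) (PySem.List.pyRange ((a : Int) + 1) (m : Int) 1) := by
      rw [hrange]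
      simp only [aFind]
      rw [hcond]
    rw [hstep]
    have hcast : ((a : Int) + 1) = ((a + 1 : Nat) : Int) := by push_cast; ring
    by_cases hge1 : (values.take (a + 1)).sum - (values.take i).sum ≥ k
    · rw [if_pos hge1]
      obtain ⟨d, ds, hds⟩ : ∃ d ds, bOuter k ((values.take m).drop (a + 1)) = d :: ds := by
        cases h : (values.take m).drop (a + 1) with
        | nil => exact ⟨0, [], rfl⟩
        | cons x xs => exact ⟨_, _, bOuter_cons k x xs⟩
      have hd : d = pvF k ((values.take m).drop (a + 1)) := by
        simp [pvF, hds]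
      rw [hdrop, hds, bScan_cons, hval, hsum, if_pos hge1, hd]
      simp only [Int.toNat_natCast]
    · rw [if_neg hge1]
      rcases Nat.lt_or_ge (a + 1) m with hlt | hge
      · have hlen2 : a + 1 < (values.take m).length := by rw [List.length_take]; omega
        have hdrop2 : (values.take m).drop (a + 1)
            = (values.take m)[a + 1] :: (values.take m).drop (a + 2) :=
          List.drop_eq_getElem_cons hlen2
        rw [hdrop, hdrop2, bOuter_cons, bScan_cons, hval, hsum, if_neg hge1, ← hdrop2,
            hcast]
        exact ihf (a + 1) (by omega) (by omega) (by omega) best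
      · have ha1 : a + 1 = m := by omega
        have hdrop2 : (values.take m).drop (a + 1) = [] :=
          List.drop_of_length_le (by rw [List.length_take]; omega)
        rw [hdrop, hdrop2]
        rw [show bOuter k ([] : List Int) = [0] from rfl, bScan_cons, hval, hsum,
            if_neg hge1, bScan_nil_ws, hcast, ha1, PySem.List.pyRange_one_eq_nil (by omega)]
        rfl

-- the dp recurrence A uses, expressed with pvF suffix values
theorem pvF_step (values : List Int) (k : Int) (m : Nat) (hm : m ≤ values.length)
    (pfx : List Int)
    (hP : ∀ t : Nat, t ≤ m → PySem.List.pyGetD pfx (t : Int) 0 = (values.take t).sum)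
    (i : Nat) (him : i < m) :
    pvF k ((values.take m).drop i)
      = match aFind pfx k (i : Int) (PySem.List.pyRange (i : Int) (m : Int) 1) with
        | none => pvF k ((values.take m).drop (i + 1))
        | some (j, su) =>
          max (pvF k ((values.take m).drop (i + 1))) (su + pvF k ((values.take m).drop (j.toNat + 1))) := by
  have hlen : i < (values.take m).length := by simp; omega
  have hdrop : (values.take m).drop i = (values.take m)[i] :: (values.take m).drop (i + 1) :=
    List.drop_eq_getElem_cons hlen
  have h := bscan_aFind values k m hm pfx hP i (m - i) i (le_refl i) (by omega) rfl
      (pvF k ((values.take m).drop (i + 1)))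
  rw [sub_self] at h
  rw [hdrop, pvF_cons, ← hdrop] at *
  rw [show (pvF k ((values.take m).drop (i + 1))) = ((bOuter k ((values.take m).drop (i + 1))).headD 0) from rfl] at h ⊢
  rw [h]
  cases haf : aFind pfx k (i : Int) (PySem.List.pyRange (i : Int) (m : Int) 1) with
  | none => rfl
  | some p =>
    cases p with
    | mk j su => simp only [pvMax_eq_ite]

def ns1spec (pfx : List Int) (k : Int) (m : Nat) (t : Nat) : Int :=
  match aFind pfx k (t : Int) (PySem.List.pyRange (t : Int) (m : Int) 1) with
  | none => -1
  | some (j, _) => j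

def ns2spec (pfx : List Int) (k : Int) (m : Nat) (t : Nat) : Int :=
  match aFind pfx k (t : Int) (PySem.List.pyRange (t : Int) (m : Int) 1) with
  | none => 0
  | some (_, su) => su

-- the next_idx / surplus arrays A builds
theorem ns_fold (pfx : List Int) (k : Int) (m : Nat) :
    ∀ c : Nat, c ≤ m →
      (PySem.List.pyRange 0 (c : Int) 1).foldl
        (fun st i =>
          match aFind pfx k i (PySem.List.pyRange i (m : Int) 1) with
          | none => st
          | some (j, su) => (PySem.List.pySetD st.1 i j, PySem.List.pySetD st.2 i su))
        (List.replicate m (-1 : Int), List.replicate m (0 : Int))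
      = ((List.range m).map (fun t => if t < c then ns1spec pfx k m t else -1),
         (List.range m).map (fun t => if t < c then ns2spec pfx k m t else 0)) := by
  intro c
  induction c with
  | zero =>
    intro _
    rw [PySem.List.pyRange_one_eq_nil (by norm_num)]
    simp only [List.foldl_nil]
    rw [replicate_eq_mapRange, replicate_eq_mapRange]
    refine Prod.ext ?_ ?_ <;> (refine List.map_congr_left ?_; intro t _; rw [if_neg (by omega)])
  | succ c ih =>
    intro hc
    have hcast : ((c + 1 : Nat) : Int) = (c : Int) + 1 := by push_cast; ring
    rw [hcast, PySem.List.pyRange_one_succ_right (by positivity), List.foldl_append,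
        ih (by omega)]
    simp only [List.foldl_cons, List.foldl_nil]
    cases haf : aFind pfx k (c : Int) (PySem.List.pyRange (c : Int) (m : Int) 1) with
    | none =>
      simp only [haf]
      refine Prod.ext ?_ ?_ <;>
        (refine List.map_congr_left ?_; intro t ht; simp only [List.mem_range] at ht;
         by_cases h3 : t = c)
      · subst h3
        rw [if_neg (by omega), if_pos (by omega)]
        simp [ns1spec, haf]
      · by_cases h4 : t < c
        · rw [if_pos h4, if_pos (by omega)]
        · rw [if_neg h4, if_neg (by omega)]
      · subst h3
        rw [if_neg (by omega), if_pos (by omega)]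
        simp [ns2spec, haf]
      · by_cases h4 : t < c
        · rw [if_pos h4, if_pos (by omega)]
        · rw [if_neg h4, if_neg (by omega)]
    | some p =>
      obtain ⟨j, su⟩ := p
      have hcm : c < m := by
        have := aFind_mem _ _ _ _ _ _ haf
        rw [PySem.List.mem_pyRange_one] at this
        omega
      simp only [haf]
      refine Prod.ext ?_ ?_ <;> simp only [] <;>
        rw [PySem.List.pySetD_natCast, mapRange_set _ _ _ _ (by omega)] <;>
        refine List.map_congr_left ?_ <;> intro t ht <;> simp only [List.mem_range] at ht <;>
        by_cases h3 : t = c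
      · subst h3
        rw [if_pos rfl, if_pos (by omega)]
        simp [ns1spec, haf]
      · rw [if_neg h3]
        by_cases h4 : t < c
        · rw [if_pos h4, if_pos (by omega)]
        · rw [if_neg h4, if_neg (by omega)]
      · subst h3
        rw [if_pos rfl, if_pos (by omega)]
        simp [ns2spec, haf]
      · rw [if_neg h3]
        by_cases h4 : t < c
        · rw [if_pos h4, if_pos (by omega)]
        · rw [if_neg h4, if_neg (by omega)]

-- the dp array A fills backwards, characterised by pvF suffix values
theorem dp_fold (values : List Int) (k : Int) (m : Nat) (hm : m ≤ values.length)
    (pfx : List Int)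
    (hP : ∀ t : Nat, t ≤ m → PySem.List.pyGetD pfx (t : Int) 0 = (values.take t).sum)
    (ns1 ns2 : List Int)
    (hns1 : ∀ t : Nat, t < m → PySem.List.pyGetD ns1 (t : Int) 0 = ns1spec pfx k m t)
    (hns2 : ∀ t : Nat, t < m → PySem.List.pyGetD ns2 (t : Int) 0 = ns2spec pfx k m t) :
    ∀ c : Nat, c ≤ m →
      (PySem.List.pyRange ((c : Int) - 1) (-1) (-1)).foldl
        (fun dp i =>
          let best := PySem.List.pyGetD dp (i + 1) 0
          let best := if PySem.List.pyGetD ns1 i 0 ≠ -1 then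
              max best (PySem.List.pyGetD ns2 i 0 + PySem.List.pyGetD dp (PySem.List.pyGetD ns1 i 0 + 1) 0)
            else best
          PySem.List.pySetD dp i best)
        ((List.range (m + 1)).map (fun t => if c ≤ t then pvF k ((values.take m).drop t) else 0))
      = (List.range (m + 1)).map (fun t => pvF k ((values.take m).drop t)) := by
  intro c
  induction c with
  | zero =>
    intro _
    rw [show ((0 : Nat) : Int) - 1 = -1 by norm_num, PySem.List.pyRange_neg_one_eq_nil (by norm_num)]
    simp only [List.foldl_nil]
    refine List.map_congr_left ?_
    intro t _
    rw [if_pos (by omega)]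
  | succ c ih =>
    intro hc
    have hcm : c < m := by omega
    have hcast : ((c + 1 : Nat) : Int) - 1 = (c : Int) := by push_cast; ring
    rw [hcast, PySem.List.pyRange_neg_one_cons (by omega)]
    simp only [List.foldl_cons]
    have hbest1 : PySem.List.pyGetD ((List.range (m + 1)).map
        (fun t => if c + 1 ≤ t then pvF k ((values.take m).drop t) else 0)) ((c : Int) + 1) 0
        = pvF k ((values.take m).drop (c + 1)) := by
      rw [show ((c : Int) + 1) = ((c + 1 : Nat) : Int) by push_cast; ring,
          PySem.List.pyGetD_natCast, mapRange_getD _ _ _ (by omega), if_pos (by omega)]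
    have hkey := pvF_step values k m hm pfx hP c hcm
    cases haf : aFind pfx k (c : Int) (PySem.List.pyRange (c : Int) (m : Int) 1) with
    | none =>
      rw [haf] at hkey
      simp only at hkey
      have h1 : PySem.List.pyGetD ns1 (c : Int) 0 = -1 := by
        rw [hns1 c hcm]; simp [ns1spec, haf]
      simp only [h1, hbest1, ne_eq, not_true_eq_false, if_false]
      rw [PySem.List.pySetD_natCast, mapRange_set _ _ _ _ (by omega)]
      have heq : (List.range (m + 1)).map
            (fun t => if t = c then pvF k ((values.take m).drop (c + 1))
              else if c + 1 ≤ t then pvF k ((values.take m).drop t) else 0)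
          = (List.range (m + 1)).map
            (fun t => if c ≤ t then pvF k ((values.take m).drop t) else 0) := by
        refine List.map_congr_left ?_
        intro t ht
        simp only [List.mem_range] at ht
        by_cases h3 : t = c
        · subst h3
          rw [if_pos rfl, if_pos (by omega)]
          exact hkey.symm
        · rw [if_neg h3]
          by_cases h4 : c + 1 ≤ t
          · rw [if_pos h4, if_pos (by omega)]
          · rw [if_neg h4, if_neg (by omega)]
      rw [heq]
      exact ih (by omega)
    | some p =>
      obtain ⟨j, su⟩ := p
      rw [haf] at hkey
      simp only at hkey
      have hjmem := aFind_mem _ _ _ _ _ _ haf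
      rw [PySem.List.mem_pyRange_one] at hjmem
      have hj0 : 0 ≤ j := by omega
      have hjm : j.toNat < m := by omega
      have hjc : c ≤ j.toNat := by omega
      have h1 : PySem.List.pyGetD ns1 (c : Int) 0 = j := by
        rw [hns1 c hcm]; simp [ns1spec, haf]
      have h2 : PySem.List.pyGetD ns2 (c : Int) 0 = su := by
        rw [hns2 c hcm]; simp [ns2spec, haf]
      have hne : j ≠ -1 := by omega
      have hdpj : PySem.List.pyGetD ((List.range (m + 1)).map
          (fun t => if c + 1 ≤ t then pvF k ((values.take m).drop t) else 0)) (j + 1) 0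
          = pvF k ((values.take m).drop (j.toNat + 1)) := by
        rw [show (j + 1 : Int) = ((j.toNat + 1 : Nat) : Int) by omega,
            PySem.List.pyGetD_natCast, mapRange_getD _ _ _ (by omega), if_pos (by omega)]
      simp only [h1, h2, hbest1, ne_eq, hne, not_false_eq_true, if_true, hdpj]
      rw [PySem.List.pySetD_natCast, mapRange_set _ _ _ _ (by omega)]
      have heq : (List.range (m + 1)).map
            (fun t => if t = c then
                max (pvF k ((values.take m).drop (c + 1))) (su + pvF k ((values.take m).drop (j.toNat + 1)))
              else if c + 1 ≤ t then pvF k ((values.take m).drop t) else 0)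
          = (List.range (m + 1)).map
            (fun t => if c ≤ t then pvF k ((values.take m).drop t) else 0) := by
        refine List.map_congr_left ?_
        intro t ht
        simp only [List.mem_range] at ht
        by_cases h3 : t = c
        · subst h3
          rw [if_pos rfl, if_pos (by omega)]
          exact hkey.symm
        · rw [if_neg h3]
          by_cases h4 : c + 1 ≤ t
          · rw [if_pos h4, if_pos (by omega)]
          · rw [if_neg h4, if_neg (by omega)]
      rw [heq]
      exact ih (by omega)

-- A's result is pvF of the processed list
theorem A_eq_pvF (k : Int) (values : List Int) (m : Nat) (hm : m ≤ values.length) :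
    compute_max_energy (m : Int) k values = pvF k (values.take m) := by
  unfold compute_max_energy
  have htn : ((m : Int)).toNat = m := by simp
  have htn1 : ((m : Int) + 1).toNat = m + 1 := by omega
  have hpfx : aPrefix (m : Int) values
      = (List.range (m + 1)).map (fun t => if t ≤ m then ((values.take t).sum) else 0) := by
    unfold aPrefix
    rw [htn1]
    exact pfx_fold values m hm m (le_refl m)
  have hP : ∀ t : Nat, t ≤ m →
      PySem.List.pyGetD (aPrefix (m : Int) values) (t : Int) 0 = (values.take t).sum := by
    intro t ht
    rw [hpfx, PySem.List.pyGetD_natCast, mapRange_getD _ _ _ (by omega), if_pos ht]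
  have hns : aNextSur (m : Int) k (aPrefix (m : Int) values)
      = ((List.range m).map (fun t => if t < m then ns1spec (aPrefix (m : Int) values) k m t else -1),
         (List.range m).map (fun t => if t < m then ns2spec (aPrefix (m : Int) values) k m t else 0)) := by
    unfold aNextSur
    rw [htn]
    exact ns_fold (aPrefix (m : Int) values) k m m (le_refl m)
  have hns1 : ∀ t : Nat, t < m →
      PySem.List.pyGetD (aNextSur (m : Int) k (aPrefix (m : Int) values)).1 (t : Int) 0
        = ns1spec (aPrefix (m : Int) values) k m t := by
    intro t ht
    rw [hns]
    simp only []
    rw [PySem.List.pyGetD_natCast, mapRange_getD _ _ _ (by omega), if_pos ht]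
  have hns2 : ∀ t : Nat, t < m →
      PySem.List.pyGetD (aNextSur (m : Int) k (aPrefix (m : Int) values)).2 (t : Int) 0
        = ns2spec (aPrefix (m : Int) values) k m t := by
    intro t ht
    rw [hns]
    simp only []
    rw [PySem.List.pyGetD_natCast, mapRange_getD _ _ _ (by omega), if_pos ht]
  have hdp : aDp (m : Int) (aNextSur (m : Int) k (aPrefix (m : Int) values))
      = (List.range (m + 1)).map (fun t => pvF k ((values.take m).drop t)) := by
    unfold aDp
    rw [htn1]
    have hinit : List.replicate (m + 1) (0 : Int)
        = (List.range (m + 1)).map (fun t => if m ≤ t then pvF k ((values.take m).drop t) else 0) := by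
      rw [replicate_eq_mapRange]
      refine List.map_congr_left ?_
      intro t ht
      simp only [List.mem_range] at ht
      by_cases h : m ≤ t
      · rw [if_pos h, List.drop_of_length_le (by rw [List.length_take]; omega), pvF_nil]
      · rw [if_neg h]
    rw [hinit]
    exact dp_fold values k m hm (aPrefix (m : Int) values) hP _ _ hns1 hns2 m (le_refl m)
  simp only []
  rw [hdp]
  rw [PySem.List.pyGetD_zero]
  rw [List.getD_eq_getElem _ _ (by simp)]
  simp only [List.getElem_map, List.getElem_range, List.drop_zero]

-- ---- B side: the forward sweep ----

-- window sum: sum of the u values starting at position i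
def pvW (vals : List Int) (i u : Nat) : Int := ((vals.drop i).take u).sum

-- candidate from start i is still open after j positions
def pvAlive (k : Int) (vals : List Int) (i j : Nat) : Bool :=
  (List.range (j - i)).all (fun u => decide (pvW vals i (u + 1) < k))

-- B's running best after j positions
def pvFwd (k : Int) (vals : List Int) (j : Nat) : Int :=
  ((vals.take j).foldl (bStep k) (0, [])).1

def pvCands (k : Int) (vals : List Int) (j : Nat) : List (Int × Int) :=
  ((List.range j).filter (fun i => pvAlive k vals i j)).map
    (fun i => (pvW vals i (j - i), pvFwd k vals i))

-- first window from the given running sum reaching k: (offset, window sum)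
def firstWin (k : Int) : Int → List Int → Option (Nat × Int)
  | _, [] => none
  | s, v :: vs =>
    if s + v ≥ k then some (0, s + v)
    else (firstWin k (s + v) vs).map (fun p => (p.1 + 1, p.2))

theorem bScan_firstWin (k : Int) :
    ∀ (ws ds : List Int) (s best : Int), ws.length ≤ ds.length →
      bScan k s best ws ds
        = match firstWin k s ws with
          | none => best
          | some (t, w) => max best (w - k + ds.getD t 0) := by
  intro ws
  induction ws with
  | nil =>
    intro ds s best _
    rw [bScan_nil_ws]
    rfl
  | cons v vs ih =>
    intro ds s best hlen
    cases ds with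
    | nil => simp at hlen
    | cons d ds' =>
      rw [bScan_cons]
      by_cases h : s + v ≥ k
      · rw [if_pos h]
        simp only [firstWin, if_pos h]
        rw [← pvMax_eq_ite]
        rfl
      · rw [if_neg h]
        simp only [firstWin, if_neg h]
        rw [ih ds' (s + v) best (by simpa using hlen)]
        cases hf : firstWin k (s + v) vs with
        | none => rfl
        | some p =>
          cases p with
          | mk t w => rfl

theorem bOuter_getD (k : Int) :
    ∀ (l : List Int) (t : Nat), t ≤ l.length → (bOuter k l).getD t 0 = pvF k (l.drop t) := by
  intro l
  induction l with
  | nil =>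
    intro t ht
    have ht0 : t = 0 := by simpa using ht
    subst ht0
    rfl
  | cons v vs ih =>
    intro t ht
    rw [bOuter_cons]
    cases t with
    | zero => rfl
    | succ t' =>
      simp only [List.getD_cons_succ, List.drop_succ_cons]
      exact ih t' (by simpa using ht)

theorem bOuter_length (k : Int) (l : List Int) : (bOuter k l).length = l.length + 1 := by
  induction l with
  | nil => rfl
  | cons v vs ih => rw [bOuter_cons]; simp [ih]

theorem firstWin_some (k : Int) :
    ∀ (l : List Int) (s : Int) (t : Nat) (w : Int), firstWin k s l = some (t, w) →
      t < l.length ∧ w = s + (l.take (t + 1)).sum ∧ k ≤ w ∧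
      ∀ u, u < t → s + (l.take (u + 1)).sum < k := by
  intro l
  induction l with
  | nil => intro s t w h; simp [firstWin] at h
  | cons v vs ih =>
    intro s t w h
    rw [firstWin] at h
    split_ifs at h with hc
    · simp only [Option.some.injEq, Prod.mk.injEq] at h
      obtain ⟨ht, hw⟩ := h
      subst ht; subst hw
      refine ⟨by simp, by simp, hc, by omega⟩
    · rw [Option.map_eq_some_iff] at h
      obtain ⟨⟨t', w'⟩, hfw, heq⟩ := h
      simp only [Prod.mk.injEq] at heq
      obtain ⟨ht, hw⟩ := heq
      subst ht; subst hw
      obtain ⟨h1, h2, h3, h4⟩ := ih (s + v) t' w' hfw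
      refine ⟨by simpa using h1, ?_, h3, ?_⟩
      · rw [List.take_succ_cons, List.sum_cons, h2]; ring
      · intro u hu
        cases u with
        | zero =>
          simp only [List.take_succ_cons, List.take_zero, List.sum_cons, List.sum_nil, add_zero]
          omega
        | succ u' =>
          have h5 := h4 u' (by omega)
          rw [List.take_succ_cons, List.sum_cons, ← add_assoc]
          exact h5

theorem firstWin_of (k : Int) :
    ∀ (l : List Int) (s : Int) (t : Nat), t < l.length → k ≤ s + (l.take (t + 1)).sum →
      (∀ u, u < t → s + (l.take (u + 1)).sum < k) →
      firstWin k s l = some (t, s + (l.take (t + 1)).sum) := by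
  intro l
  induction l with
  | nil => intro s t ht; simp at ht
  | cons v vs ih =>
    intro s t ht hk hlt
    rw [firstWin]
    cases t with
    | zero =>
      rw [if_pos (by simpa using hk)]
      simp
    | succ t' =>
      have h0 : ¬ s + v ≥ k := by
        have := hlt 0 (by omega)
        simpa using this
      rw [if_neg h0]
      have := ih (s + v) t' (by simpa using ht)
        (by simpa [add_assoc] using hk)
        (by intro u hu; have := hlt (u + 1) (by omega); simpa [add_assoc] using this)
      rw [this]
      simp [add_assoc]

-- pvF's recurrence in firstWin form
theorem pvF_rec (k : Int) (vals : List Int) (i : Nat) (hi : i < vals.length) :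
    pvF k (vals.drop i)
      = match firstWin k 0 (vals.drop i) with
        | none => pvF k (vals.drop (i + 1))
        | some (t, w) => max (pvF k (vals.drop (i + 1))) (w - k + pvF k (vals.drop (i + t + 1))) := by
  have hlt : i < vals.length := hi
  have hcons : vals.drop i = vals[i] :: vals.drop (i + 1) := List.drop_eq_getElem_cons hlt
  rw [hcons, pvF_cons]
  rw [bScan_firstWin k _ _ 0 (pvF k (vals.drop (i + 1)))
    (by rw [bOuter_length]; simp; omega)]
  cases hf : firstWin k 0 (vals[i] :: vals.drop (i + 1)) with
  | none => rfl
  | some p =>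
    obtain ⟨t, w⟩ := p
    obtain ⟨h1, -, -, -⟩ := firstWin_some k _ _ _ _ hf
    simp only [List.length_cons] at h1
    have hgd : (bOuter k (vals.drop (i + 1))).getD t 0 = pvF k (vals.drop (i + t + 1)) := by
      rw [bOuter_getD k _ t (by simp only [List.length_drop] at h1 ⊢; omega), List.drop_drop,
        show i + 1 + t = i + t + 1 by omega]
    simp only []
    rw [hgd]

theorem pvF_rec_mono (k : Int) (vals : List Int) (i : Nat) (hi : i < vals.length) :
    pvF k (vals.drop (i + 1)) ≤ pvF k (vals.drop i) := by
  rw [pvF_rec k vals i hi]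
  cases hf : firstWin k 0 (vals.drop i) with
  | none => exact le_refl _
  | some p =>
    obtain ⟨t, w⟩ := p
    exact le_max_left _ _

theorem pvW_succ (vals : List Int) (i j : Nat) (hij : i ≤ j) (hj : j < vals.length) :
    pvW vals i (j - i) + vals[j] = pvW vals i (j + 1 - i) := by
  unfold pvW
  have h1 : j + 1 - i = (j - i) + 1 := by omega
  rw [h1, List.sum_take_succ _ _ (by simp; omega)]
  congr 1
  rw [List.getElem_drop]
  congr 1
  omega

theorem pvAlive_refl (k : Int) (vals : List Int) (i j : Nat) (h : j ≤ i) :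
    pvAlive k vals i j = true := by
  unfold pvAlive
  rw [show j - i = 0 by omega]
  rfl

theorem pvAlive_succ (k : Int) (vals : List Int) (i j : Nat) (hij : i ≤ j) :
    pvAlive k vals i (j + 1) = (pvAlive k vals i j && decide (pvW vals i (j + 1 - i) < k)) := by
  unfold pvAlive
  have h1 : j + 1 - i = (j - i) + 1 := by omega
  rw [h1, List.range_succ, List.all_append]
  simp

theorem relax_ge_init (k v : Int) : ∀ (L : List (Int × Int)) (b : Int),
    b ≤ L.foldl (fun a c => if c.1 + v ≥ k then max a (c.2 + (c.1 + v) - k) else a) b := by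
  intro L
  induction L with
  | nil => intro b; simp
  | cons c cs ih =>
    intro b
    simp only [List.foldl_cons]
    refine le_trans ?_ (ih _)
    split_ifs with h
    · exact le_max_left _ _
    · exact le_refl _

theorem relax_ge_mem (k v : Int) : ∀ (L : List (Int × Int)) (b : Int) (c : Int × Int),
    c ∈ L → c.1 + v ≥ k →
    c.2 + (c.1 + v) - k
      ≤ L.foldl (fun a c => if c.1 + v ≥ k then max a (c.2 + (c.1 + v) - k) else a) b := by
  intro L
  induction L with
  | nil => intro b c h; simp at h
  | cons d ds ih =>
    intro b c hmem hge
    simp only [List.foldl_cons]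
    rcases List.mem_cons.mp hmem with h | h
    · subst h
      refine le_trans ?_ (relax_ge_init k v ds _)
      rw [if_pos hge]
      exact le_max_right _ _
    · exact ih _ c h hge

theorem relax_le (k v : Int) : ∀ (L : List (Int × Int)) (b cM : Int),
    b ≤ cM → (∀ c ∈ L, c.1 + v ≥ k → c.2 + (c.1 + v) - k ≤ cM) →
    L.foldl (fun a c => if c.1 + v ≥ k then max a (c.2 + (c.1 + v) - k) else a) b ≤ cM := by
  intro L
  induction L with
  | nil => intro b cM hb _; simpa using hb
  | cons d ds ih =>
    intro b cM hb hc
    simp only [List.foldl_cons]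
    refine ih _ cM ?_ (fun c h hg => hc c (List.mem_cons_of_mem _ h) hg)
    split_ifs with h
    · exact max_le hb (hc d List.mem_cons_self h)
    · exact hb

theorem innerFold (k v : Int) : ∀ (L : List (Int × Int)) (b : Int) (p : List (Int × Int)),
    L.foldl (fun (acc : Int × List (Int × Int)) (c : Int × Int) =>
        if c.1 + v ≥ k then (max acc.1 (c.2 + (c.1 + v) - k), acc.2)
        else (acc.1, acc.2 ++ [(c.1 + v, c.2)])) (b, p)
    = (L.foldl (fun a c => if c.1 + v ≥ k then max a (c.2 + (c.1 + v) - k) else a) b,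
       p ++ (L.filter (fun c => decide (c.1 + v < k))).map (fun c => (c.1 + v, c.2))) := by
  intro L
  induction L with
  | nil => intro b p; simp
  | cons c cs ih =>
    intro b p
    simp only [List.foldl_cons, List.filter_cons]
    by_cases h : c.1 + v ≥ k
    · have h' : ¬ (c.1 + v < k) := not_lt.mpr h
      rw [if_pos h, if_pos h, ih]
      simp [h']
    · have h' : c.1 + v < k := not_le.mp h
      rw [if_neg h, if_neg h, ih]
      simp [h']

theorem candsExt (k : Int) (vals : List Int) (j : Nat) :
    pvCands k vals j ++ [(0, pvFwd k vals j)]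
      = ((List.range (j + 1)).filter (fun i => pvAlive k vals i j)).map
          (fun i => (pvW vals i (j - i), pvFwd k vals i)) := by
  unfold pvCands
  rw [List.range_succ, List.filter_append, List.map_append]
  congr 1
  rw [List.filter_cons]
  rw [pvAlive_refl k vals j j (le_refl j)]
  simp [pvW]

-- the invariant of B's fold
theorem bInv (k : Int) (vals : List Int) :
    ∀ j, j ≤ vals.length →
      (vals.take j).foldl (bStep k) (0, []) = (pvFwd k vals j, pvCands k vals j) := by
  intro j
  induction j with
  | zero => intro _; rfl
  | succ j ih =>
    intro hj
    have hj' : j < vals.length := by omega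
    have htake : vals.take (j + 1) = vals.take j ++ [vals[j]] := by
      rw [List.take_add_one, List.getElem?_eq_getElem hj']
      rfl
    have hF1 : (vals.take (j + 1)).foldl (bStep k) (0, [])
        = bStep k (pvFwd k vals j, pvCands k vals j) vals[j] := by
      rw [htake, List.foldl_append, ih (by omega), List.foldl_cons, List.foldl_nil]
    rw [hF1]
    have hbs : bStep k (pvFwd k vals j, pvCands k vals j) vals[j]
        = ((((List.range (j + 1)).filter (fun i => pvAlive k vals i j)).map
              (fun i => (pvW vals i (j - i), pvFwd k vals i))).foldl
            (fun a c => if c.1 + vals[j] ≥ k then max a (c.2 + (c.1 + vals[j]) - k) else a)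
            (pvFwd k vals j),
           ((((List.range (j + 1)).filter (fun i => pvAlive k vals i j)).map
               (fun i => (pvW vals i (j - i), pvFwd k vals i))).filter
             (fun c => decide (c.1 + vals[j] < k))).map (fun c => (c.1 + vals[j], c.2))) := by
      simp only [bStep]
      rw [candsExt, innerFold]
      simp
    rw [hbs]
    have hfst : pvFwd k vals (j + 1)
        = (((List.range (j + 1)).filter (fun i => pvAlive k vals i j)).map
             (fun i => (pvW vals i (j - i), pvFwd k vals i))).foldl
            (fun a c => if c.1 + vals[j] ≥ k then max a (c.2 + (c.1 + vals[j]) - k) else a)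
            (pvFwd k vals j) := by
      show ((vals.take (j + 1)).foldl (bStep k) (0, [])).1 = _
      rw [hF1, hbs]
    have hsnd : ((((List.range (j + 1)).filter (fun i => pvAlive k vals i j)).map
               (fun i => (pvW vals i (j - i), pvFwd k vals i))).filter
             (fun c => decide (c.1 + vals[j] < k))).map (fun c => (c.1 + vals[j], c.2))
        = pvCands k vals (j + 1) := by
      rw [List.filter_map, List.map_map]
      unfold pvCands
      rw [List.filter_filter]
      have hfil : (List.range (j + 1)).filter
            (fun a => ((fun (c : Int × Int) => decide (c.1 + vals[j] < k)) ∘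
              (fun i => (pvW vals i (j - i), pvFwd k vals i))) a && pvAlive k vals a j)
          = (List.range (j + 1)).filter (fun i => pvAlive k vals i (j + 1)) := by
        apply List.filter_congr
        intro i hi
        have hij : i ≤ j := by
          rw [List.mem_range] at hi; omega
        simp only [Function.comp_apply]
        rw [pvAlive_succ k vals i j hij, ← pvW_succ vals i j hij hj', Bool.and_comm]
      rw [hfil]
      apply List.map_congr_left
      intro i hi
      have hij : i ≤ j := by
        have := List.mem_range.mp (List.mem_of_mem_filter hi)
        omega
      simp only [Function.comp_apply]
      rw [pvW_succ vals i j hij hj']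
    rw [hfst.symm, hsnd]

-- pvFwd recurrence facts
theorem pvFwd_succ (k : Int) (vals : List Int) (j : Nat) (hj : j < vals.length) :
    pvFwd k vals (j + 1)
      = (((List.range (j + 1)).filter (fun i => pvAlive k vals i j)).map
           (fun i => (pvW vals i (j - i), pvFwd k vals i))).foldl
          (fun a c => if c.1 + vals[j] ≥ k then max a (c.2 + (c.1 + vals[j]) - k) else a)
          (pvFwd k vals j) := by
  have htake : vals.take (j + 1) = vals.take j ++ [vals[j]] := by
    rw [List.take_add_one, List.getElem?_eq_getElem hj]
    rfl
  show ((vals.take (j + 1)).foldl (bStep k) (0, [])).1 = _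
  rw [htake, List.foldl_append, bInv k vals j (by omega), List.foldl_cons, List.foldl_nil]
  simp only [bStep]
  rw [candsExt, innerFold]

theorem pvFwd_mono (k : Int) (vals : List Int) (j : Nat) (hj : j < vals.length) :
    pvFwd k vals j ≤ pvFwd k vals (j + 1) := by
  rw [pvFwd_succ k vals j hj]
  exact relax_ge_init k vals[j] _ _

theorem pvFwd_contrib (k : Int) (vals : List Int) (j i : Nat) (hj : j < vals.length)
    (hij : i ≤ j) (halive : pvAlive k vals i j = true) (hcl : k ≤ pvW vals i (j + 1 - i)) :
    pvFwd k vals i + pvW vals i (j + 1 - i) - k ≤ pvFwd k vals (j + 1) := by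
  rw [pvFwd_succ k vals j hj]
  have hmem : (pvW vals i (j - i), pvFwd k vals i)
      ∈ ((List.range (j + 1)).filter (fun i => pvAlive k vals i j)).map
          (fun i => (pvW vals i (j - i), pvFwd k vals i)) :=
    List.mem_map_of_mem (List.mem_filter.mpr ⟨List.mem_range.mpr (by omega), halive⟩)
  have hge : (pvW vals i (j - i), pvFwd k vals i).1 + vals[j] ≥ k := by
    simp only []
    rw [pvW_succ vals i j hij hj]
    exact hcl
  have h := relax_ge_mem k vals[j] _ (pvFwd k vals j) _ hmem hge
  simp only [] at h
  rw [pvW_succ vals i j hij hj] at h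
  exact h

theorem pvFwd_le (k : Int) (vals : List Int) (j : Nat) (hj : j < vals.length) (c : Int)
    (hbase : pvFwd k vals j ≤ c)
    (hcl : ∀ i, i ≤ j → pvAlive k vals i j = true → k ≤ pvW vals i (j + 1 - i) →
      pvFwd k vals i + pvW vals i (j + 1 - i) - k ≤ c) :
    pvFwd k vals (j + 1) ≤ c := by
  rw [pvFwd_succ k vals j hj]
  refine relax_le k vals[j] _ _ c hbase ?_
  intro cd hmem hge
  obtain ⟨i, hif, hci⟩ := List.mem_map.mp hmem
  obtain ⟨hir, hia⟩ := List.mem_filter.mp hif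
  have hij : i ≤ j := by
    have := List.mem_range.mp hir
    omega
  subst hci
  simp only [] at hge ⊢
  rw [pvW_succ vals i j hij hj] at hge ⊢
  exact hcl i hij hia hge

-- the two longest-path inequalities
theorem L1 (k : Int) (vals : List Int) :
    ∀ j, j ≤ vals.length → ∀ i, i ≤ j → pvFwd k vals i + pvF k (vals.drop i) ≤ pvF k vals := by
  intro j
  induction j with
  | zero =>
    intro _ i hi
    have h0 : i = 0 := by omega
    subst h0
    simp [pvFwd, pvF]
  | succ j ihj =>
    intro hj i hi
    have hj' : j < vals.length := by omega
    rcases Nat.lt_or_ge i (j + 1) with h | h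
    · exact ihj (by omega) i (by omega)
    · have hi1 : i = j + 1 := by omega
      subst hi1
      have hbase : pvFwd k vals j ≤ pvF k vals - pvF k (vals.drop (j + 1)) := by
        have h1 := ihj (by omega) j (le_refl j)
        have h2 := pvF_rec_mono k vals j hj'
        omega
      have hle : pvFwd k vals (j + 1) ≤ pvF k vals - pvF k (vals.drop (j + 1)) := by
        refine pvFwd_le k vals j hj' _ hbase ?_
        intro i hij hia hki
        have hIH := ihj (by omega) i (by omega)
        -- the first window from i closes exactly at j, so dp i contains the jump term
        have htlt : j - i < (vals.drop i).length := by
          rw [List.length_drop]; omega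
        have hsum : ∀ u : Nat, ((vals.drop i).take (u + 1)).sum = pvW vals i (u + 1) := by
          intro u; rfl
        have halive' : ∀ u, u < j - i → (0 : Int) + ((vals.drop i).take (u + 1)).sum < k := by
          intro u hu
          have := (List.all_eq_true.mp hia) u (by rw [List.mem_range]; omega)
          rw [hsum, zero_add]
          simpa using this
        have hfw : firstWin k 0 (vals.drop i)
            = some (j - i, 0 + ((vals.drop i).take ((j - i) + 1)).sum) := by
          refine firstWin_of k _ 0 (j - i) htlt ?_ halive'
          rw [hsum, zero_add, show j - i + 1 = j + 1 - i by omega]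
          exact hki
        have hrec := pvF_rec k vals i (by omega)
        rw [hfw] at hrec
        simp only [] at hrec
        have hjump : 0 + ((vals.drop i).take ((j - i) + 1)).sum - k + pvF k (vals.drop (i + (j - i) + 1))
            ≤ pvF k (vals.drop i) := by
          rw [hrec]
          exact le_max_right _ _
        rw [hsum, zero_add, show j - i + 1 = j + 1 - i by omega,
            show i + (j - i) + 1 = j + 1 by omega] at hjump
        omega
      have h2 := pvF_rec_mono k vals j hj'
      omega

theorem L2 (k : Int) (vals : List Int) :
    ∀ t i, vals.length - i ≤ t → i ≤ vals.length →
      pvFwd k vals i + pvF k (vals.drop i) ≤ pvFwd k vals vals.length := by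
  intro t
  induction t with
  | zero =>
    intro i ht hi
    have h0 : i = vals.length := by omega
    subst h0
    rw [List.drop_length, pvF_nil]
    omega
  | succ t iht =>
    intro i ht hi
    rcases Nat.eq_or_lt_of_le hi with h | h
    · subst h
      rw [List.drop_length, pvF_nil]
      omega
    · have hrec := pvF_rec k vals i h
      have hA : pvFwd k vals i + pvF k (vals.drop (i + 1)) ≤ pvFwd k vals vals.length := by
        have hm := pvFwd_mono k vals i h
        have := iht (i + 1) (by omega) (by omega)
        omega
      cases hf : firstWin k 0 (vals.drop i) with
      | none =>
        rw [hf] at hrec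
        simp only [] at hrec
        rw [hrec]
        exact hA
      | some p =>
        obtain ⟨t', w⟩ := p
        rw [hf] at hrec
        simp only [] at hrec
        rw [hrec]
        obtain ⟨h1, h2, h3, h4⟩ := firstWin_some k _ _ _ _ hf
        rw [List.length_drop] at h1
        have hj' : i + t' < vals.length := by omega
        have hsum : ∀ u : Nat, ((vals.drop i).take (u + 1)).sum = pvW vals i (u + 1) := by
          intro u; rfl
        have halive : pvAlive k vals i (i + t') = true := by
          unfold pvAlive
          rw [show i + t' - i = t' by omega]
          rw [List.all_eq_true]
          intro u hu
          rw [List.mem_range] at hu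
          have := h4 u hu
          rw [hsum, zero_add] at this
          simpa using this
        have hkw : k ≤ pvW vals i (i + t' + 1 - i) := by
          rw [show i + t' + 1 - i = t' + 1 by omega, ← hsum, ← zero_add (((vals.drop i).take (t' + 1)).sum), ← h2]
          exact h3
        have hcontrib := pvFwd_contrib k vals (i + t') i hj' (by omega) halive hkw
        have hw : w = ((vals.drop i).take (t' + 1)).sum := by rw [h2, zero_add]
        rw [show i + t' + 1 - i = t' + 1 by omega, ← hsum t', ← hw] at hcontrib
        have hrest := iht (i + t' + 1) (by omega) (by omega)
        have hmax : pvFwd k vals i + max (pvF k (vals.drop (i + 1))) (w - k + pvF k (vals.drop (i + t' + 1)))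
            ≤ pvFwd k vals vals.length := by
          rcases max_cases (pvF k (vals.drop (i + 1))) (w - k + pvF k (vals.drop (i + t' + 1))) with ⟨hm, -⟩ | ⟨hm, -⟩
          · rw [hm]; exact hA
          · rw [hm]
            omega
        exact hmax

theorem B_eq_pvF (k : Int) (vals : List Int) :
    pvFwd k vals vals.length = pvF k vals := by
  apply le_antisymm
  · have := L1 k vals vals.length (le_refl _) vals.length (le_refl _)
    rw [List.drop_length, pvF_nil] at this
    omega
  · have := L2 k vals vals.length 0 (by omega) (by omega)
    have h0 : pvFwd k vals 0 = 0 := rfl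
    rw [List.drop_zero, h0] at this
    omega

-- ===== VERDICT (by name: the statement is the Claim_ definition above) =====
theorem compute_max_energy_spec : Claim_equal_compute_max_energy := by
  intro n k values _hdom hpre
  obtain ⟨hn0, hnlen⟩ := hpre
  obtain ⟨m, rfl⟩ : ∃ m : Nat, n = (m : Int) := ⟨n.toNat, (Int.toNat_of_nonneg hn0).symm⟩
  have hm : m ≤ values.length := by exact_mod_cast hnlen
  unfold Spec_compute_max_energy compute_max_energy_alt
  rw [PySem.List.slice_to_natCast]
  have hlen : (values.take m).length = m := by rw [List.length_take]; omega
  have hB : ((values.take m).foldl (bStep k) (0, [])).1 = pvFwd k (values.take m) m := by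
    unfold pvFwd
    rw [List.take_of_length_le (le_of_eq hlen)]
  have hBF := B_eq_pvF k (values.take m)
  rw [hlen] at hBF
  rw [hB, hBF, A_eq_pvF k values m hm]
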